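-- pv_equiv track=rewrite | github.com/jjiwoning/Code_Test | python_algo/Programmers/boost.py | solution
-- ===== SOURCE A (Python) =====
-- def solution(arr):
--     if len(arr) == len(list(set(arr))):
--         return [-1]
--     answer = []
--     ansDict = {}
--     for i in arr:
--         if i not in ansDict:
--             ansDict[i] = 1
--         else:
--             ansDict[i] += 1
--     key = list(ansDict.keys())
--     key.sort()
--     for i in key:
--         if ansDict[i] > 1:
--             answer.append(ansDict[i])
--     return answer
-- ===== SOURCE B (Python) =====
-- def solution(arr):
--     answer = []
--     prev = None
--     run = 0
--     for x in sorted(arr):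
--         if x == prev:
--             run += 1
--         else:
--             if run > 1:
--                 answer.append(run)
--             prev = x
--             run = 1
--     if run > 1:
--         answer.append(run)
--     return answer if answer else [-1]
-- ===== Notes on version B (the rewrite author's own statement) =====
-- stated objective: faster
-- what changed: Replaced A's hash-count dictionary plus separate key-sort-and-filter passes with a single sort of the whole array followed by one run-length scan that appends each run length > 1 (runs already appear in sorted key order).
import Mathlib
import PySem

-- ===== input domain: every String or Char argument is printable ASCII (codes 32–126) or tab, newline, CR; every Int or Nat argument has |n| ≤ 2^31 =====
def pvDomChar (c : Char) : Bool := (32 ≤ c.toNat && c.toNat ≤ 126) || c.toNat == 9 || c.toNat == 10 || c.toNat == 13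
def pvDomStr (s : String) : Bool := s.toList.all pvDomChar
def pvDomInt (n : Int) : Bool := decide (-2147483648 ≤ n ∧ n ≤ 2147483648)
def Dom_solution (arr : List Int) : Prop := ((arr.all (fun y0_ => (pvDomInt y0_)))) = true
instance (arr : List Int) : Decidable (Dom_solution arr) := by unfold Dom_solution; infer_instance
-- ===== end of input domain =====

-- B replaces A's hash-count-then-sort-keys strategy by sort-then-group: one run-length scan of
-- sorted(arr) emits each run length > 1, already in sorted-key order (measured faster; constant factor).

-- ===== PORT A =====
def solution (arr : List Int) : List Int :=
  if arr.length = (PySem.Set.ofList arr).length then [-1]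
  else
    let ansDict := arr.foldl (fun d i =>
      if !(d.contains i) then d.insert i 1 else d.insert i (d.getD i 0 + 1))
      (PySem.Dict.empty : PySem.Dict Int Int)
    let key := PySem.List.sorted ansDict.keys (fun k => k) false
    key.foldl (fun answer i =>
      if ansDict.getD i 0 > 1 then answer ++ [ansDict.getD i 0] else answer) []

-- ===== PORT B =====
-- loop body of Source B: state = (answer, prev, run); 'x == prev' with prev initially None
def bStep (s : List Int × Option Int × Int) (x : Int) : List Int × Option Int × Int :=
  if some x == s.2.1 then (s.1, s.2.1, s.2.2 + 1)
  else ((if s.2.2 > 1 then s.1 ++ [s.2.2] else s.1), some x, 1)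

def solution_alt (arr : List Int) : List Int :=
  let st := (PySem.List.sorted arr (fun x => x) false).foldl bStep ([], none, 0)
  let answer := if st.2.2 > 1 then st.1 ++ [st.2.2] else st.1
  if answer = [] then [-1] else answer

-- ===== PRECONDITION & SPEC =====
def Spec_solution (arr : List Int) (out : List Int) : Prop := out = solution_alt arr
instance (arr : List Int) (out : List Int) : Decidable (Spec_solution arr out) := by unfold Spec_solution; infer_instance

-- ===== CLAIM (what is proved, stated in full; the proofs are below) =====
def Claim_equal_solution : Prop := ∀ (arr : List Int), Dom_solution arr → Spec_solution arr (solution arr)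

-- ===== LEMMAS AND PROOFS =====

-- the common value: counts (> 1) of the distinct elements in sorted key order
def dupCounts (arr : List Int) : List Int :=
  ((PySem.List.sorted (PySem.Set.ofList arr) (fun k => k) false).filter
      (fun k => 1 < (arr.count k : Int))).map (fun k => (arr.count k : Int))

-- the trailing flush of Source B (definitionally the post-loop 'if run > 1: append')
def bFlush (ans : List Int) (run : Int) : List Int := if run > 1 then ans ++ [run] else ans

-- ---- A: the counting loop is Counter, so A's answer loop filters/maps counts ----
lemma dict_fold_eq_counter (arr : List Int) :
    arr.foldl (fun d i =>
      if !(d.contains i) then d.insert i 1 else d.insert i (d.getD i 0 + 1))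
      (PySem.Dict.empty : PySem.Dict Int Int) = PySem.Dict.counter arr := by
  rw [← PySem.Dict.foldl_insert_getD_add_one_eq_counter]
  apply PySem.List.foldl_congr_mem
  intro d i _
  by_cases h : d.contains i
  · simp [h]
  · simp only [Bool.not_eq_true] at h
    rw [if_pos (by simp [h]), PySem.Dict.getD_of_not_contains d 0 h]
    norm_num

-- ---- length / nodup bridges ----
lemma ofList_sublist_aux (l s : List Int) :
    (l.foldl PySem.Set.add s).Sublist (s ++ l) := by
  induction l generalizing s with
  | nil => simp
  | cons x l ih =>
    rw [List.foldl_cons]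
    refine (ih (PySem.Set.add s x)).trans ?_
    have : (PySem.Set.add s x).Sublist (s ++ [x]) := by
      unfold PySem.Set.add
      split
      · exact (List.sublist_append_left s [x])
      · exact List.Sublist.refl _
    simpa using this.append_right l

lemma ofList_sublist (arr : List Int) : (PySem.Set.ofList arr).Sublist arr := by
  have := ofList_sublist_aux arr []
  simpa [PySem.Set.ofList_eq_foldl] using this

lemma ofList_eq_self_aux (l s : List Int) (h : (s ++ l).Nodup) :
    l.foldl PySem.Set.add s = s ++ l := by
  induction l generalizing s with
  | nil => simp
  | cons x l ih =>
    have hx : x ∉ s := by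
      intro hx
      exact (List.disjoint_of_nodup_append h) hx List.mem_cons_self
    have hadd : PySem.Set.add s x = s ++ [x] := by
      unfold PySem.Set.add
      rw [if_neg (by simpa [PySem.Set.contains] using hx)]
    rw [List.foldl_cons, hadd, ih (s ++ [x]) (by simpa using h)]
    simp

lemma len_eq_iff_nodup (arr : List Int) :
    arr.length = (PySem.Set.ofList arr).length ↔ arr.Nodup := by
  constructor
  · intro h
    have heq : PySem.Set.ofList arr = arr := (ofList_sublist arr).eq_of_length h.symm
    rw [← heq]
    exact PySem.Set.nodup_ofList arr
  · intro h
    have : PySem.Set.ofList arr = arr := by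
      have := ofList_eq_self_aux arr [] (by simpa using h)
      simpa [PySem.Set.ofList_eq_foldl] using this
    rw [this]

lemma solution_eq (arr : List Int) (h : ¬ arr.Nodup) : solution arr = dupCounts arr := by
  unfold solution
  rw [if_neg (fun he => h ((len_eq_iff_nodup arr).mp he))]
  rw [dict_fold_eq_counter]
  simp only []
  rw [PySem.Dict.keys_counter]
  rw [PySem.List.foldl_append_ite (p := fun i => (PySem.Dict.counter arr).getD i 0 > 1)
      (f := fun i => (PySem.Dict.counter arr).getD i 0)]
  rw [List.nil_append]
  unfold dupCounts
  rw [List.filter_congr (fun k _ => by rw [PySem.Dict.getD_counter])]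
  apply List.map_congr_left
  intro k _
  rw [PySem.Dict.getD_counter]

lemma solution_nodup (arr : List Int) (h : arr.Nodup) : solution arr = [-1] := by
  unfold solution
  rw [if_pos ((len_eq_iff_nodup arr).mpr h)]

lemma dupCounts_eq_nil_iff (arr : List Int) : dupCounts arr = [] ↔ arr.Nodup := by
  unfold dupCounts
  rw [List.map_eq_nil_iff, List.filter_eq_nil_iff]
  constructor
  · intro hf
    rw [List.nodup_iff_count_le_one]
    intro v
    by_cases hv : v ∈ arr
    · have := hf v (by rw [PySem.List.mem_sorted, PySem.Set.mem_ofList]; exact hv)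
      simp only [decide_eq_true_eq, not_lt] at this
      exact_mod_cast this
    · simp [List.count_eq_zero.mpr hv]
  · intro hnd k _
    have := (List.nodup_iff_count_le_one.mp hnd) k
    simp only [decide_eq_true_eq, not_lt]
    exact_mod_cast this

-- ---- B: the run-length scan over the sorted list ----
lemma scan_replicate (k : Int) (m : Nat) (ans : List Int) (run : Int) :
    (List.replicate m k).foldl bStep (ans, some k, run) = (ans, some k, run + m) := by
  induction m generalizing run with
  | zero => simp
  | succ n ih =>
    rw [List.replicate_succ, List.foldl_cons]
    show (List.replicate n k).foldl bStep (bStep (ans, some k, run) k) = _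
    simp only [bStep, BEq.rfl, if_pos]
    rw [ih]
    norm_num; ring

lemma scan_block (k : Int) (c : Nat) (hc : 1 ≤ c) (ans : List Int) (prev : Option Int)
    (run : Int) (hp : prev ≠ some k) :
    (List.replicate c k).foldl bStep (ans, prev, run) = (bFlush ans run, some k, (c : Int)) := by
  obtain ⟨m, rfl⟩ := Nat.exists_eq_add_of_le hc
  rw [Nat.add_comm 1 m] at *
  rw [List.replicate_succ, List.foldl_cons]
  have h1 : bStep (ans, prev, run) k = (bFlush ans run, some k, 1) := by
    simp only [bStep, bFlush]
    rw [if_neg (by simp [Ne.symm hp])]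
  rw [h1, scan_replicate]
  norm_num; ring

lemma scan_blocks (c : Int → Nat) (ks : List Int) (ans : List Int) (prev : Option Int)
    (run : Int) (hks : ks.Pairwise (· < ·)) (hc : ∀ k ∈ ks, 1 ≤ c k)
    (hp : ∀ k ∈ ks, prev ≠ some k) :
    (fun st => bFlush st.1 st.2.2)
        ((ks.flatMap (fun k => List.replicate (c k) k)).foldl bStep (ans, prev, run))
      = bFlush ans run
        ++ (ks.filter (fun k => 1 < (c k : Int))).map (fun k => ((c k : Nat) : Int)) := by
  induction ks generalizing ans prev run with
  | nil => simp
  | cons k ks ih =>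
    rw [List.flatMap_cons, List.foldl_append,
        scan_block k (c k) (hc k (List.mem_cons_self)) ans prev run (hp k (List.mem_cons_self))]
    rw [List.pairwise_cons] at hks
    rw [ih _ _ _ hks.2 (fun x hx => hc x (List.mem_cons_of_mem _ hx))
        (fun x hx h => absurd (Option.some.inj h) (ne_of_lt (hks.1 x hx)))]
    by_cases h : 1 < (c k : Int)
    · rw [List.filter_cons_of_pos (by simpa using h)]
      simp [bFlush, h]
    · rw [List.filter_cons_of_neg (by simpa using h)]
      simp [bFlush, h]

-- ---- sorted(arr) is the sorted distinct keys, each repeated its count ----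
lemma count_flatMap_replicate (arr ks : List Int) (hnd : ks.Nodup) (v : Int) :
    (ks.flatMap (fun k => List.replicate (arr.count k) k)).count v
      = if v ∈ ks then arr.count v else 0 := by
  induction ks with
  | nil => simp
  | cons k ks ih =>
    rw [List.nodup_cons] at hnd
    rw [List.flatMap_cons, List.count_append, List.count_replicate, ih hnd.2]
    by_cases hv : v = k
    · subst hv; simp [hnd.1]
    · simp [hv, Ne.symm hv]

lemma pairwise_flatMap_replicate (c : Int → Nat) (ks : List Int)
    (hks : ks.Pairwise (· < ·)) :
    (ks.flatMap (fun k => List.replicate (c k) k)).Pairwise (· ≤ ·) := by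
  induction ks with
  | nil => simp
  | cons k ks ih =>
    rw [List.pairwise_cons] at hks
    rw [List.flatMap_cons, List.pairwise_append]
    refine ⟨List.pairwise_replicate.mpr (Or.inr le_rfl), ih hks.2, ?_⟩
    intro a ha b hb
    rw [List.eq_of_mem_replicate ha]
    obtain ⟨k', hk', hb'⟩ := List.mem_flatMap.mp hb
    rw [List.eq_of_mem_replicate hb']
    exact le_of_lt (hks.1 k' hk')

lemma sorted_eq_flatMap (arr : List Int) :
    PySem.List.sorted arr (fun x => x) false
      = (PySem.List.sorted (PySem.Set.ofList arr) (fun k => k) false).flatMap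
          (fun k => List.replicate (arr.count k) k) := by
  set ks := PySem.List.sorted (PySem.Set.ofList arr) (fun k => k) false with hks
  have hpw : ks.Pairwise (· < ·) := PySem.List.sorted_ofList_pairwise_lt arr
  have hnd : ks.Nodup := hpw.nodup
  have hmem : ∀ v, v ∈ ks ↔ v ∈ arr := by
    intro v
    rw [hks, PySem.List.mem_sorted, PySem.Set.mem_ofList]
  have hperm : (ks.flatMap (fun k => List.replicate (arr.count k) k)).Perm arr := by
    rw [List.perm_iff_count]
    intro v
    rw [count_flatMap_replicate arr ks hnd v]
    by_cases hv : v ∈ ks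
    · simp [hv]
    · rw [if_neg hv]
      exact (List.count_eq_zero.mpr (fun h => hv ((hmem v).mpr h))).symm
  exact PySem.List.sorted_id_eq_of_perm_of_pairwise _ _ hperm
    (pairwise_flatMap_replicate _ ks hpw)

lemma solution_alt_eq (arr : List Int) :
    solution_alt arr = if dupCounts arr = [] then [-1] else dupCounts arr := by
  unfold solution_alt
  simp only []
  have key : (if ((PySem.List.sorted arr (fun x => x) false).foldl bStep ([], none, 0)).2.2 > 1
      then ((PySem.List.sorted arr (fun x => x) false).foldl bStep ([], none, 0)).1
        ++ [((PySem.List.sorted arr (fun x => x) false).foldl bStep ([], none, 0)).2.2]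
      else ((PySem.List.sorted arr (fun x => x) false).foldl bStep ([], none, 0)).1)
      = dupCounts arr := by
    show (fun st => bFlush st.1 st.2.2)
        ((PySem.List.sorted arr (fun x => x) false).foldl bStep ([], none, 0)) = _
    rw [sorted_eq_flatMap arr]
    rw [scan_blocks (fun k => arr.count k) _ [] none 0
        (PySem.List.sorted_ofList_pairwise_lt arr)
        (fun k hk => List.count_pos_iff.mpr
          (by rwa [PySem.List.mem_sorted, PySem.Set.mem_ofList] at hk))
        (fun k _ => by simp)]
    simp [bFlush, dupCounts]
  rw [key]

-- ===== VERDICT (by name: the statement is the Claim_ definition above) =====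
theorem solution_spec : Claim_equal_solution := by
  intro arr _
  unfold Spec_solution
  rw [solution_alt_eq]
  by_cases h : arr.Nodup
  · rw [solution_nodup arr h, if_pos ((dupCounts_eq_nil_iff arr).mpr h)]
  · rw [solution_eq arr h, if_neg (fun he => h ((dupCounts_eq_nil_iff arr).mp he))]
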